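-- pv_equiv track=rewrite | github.com/aminariafar/Pyxcel-Language | pyxcel.py | delSpace
-- ===== SOURCE A (Python) =====
-- def delSpace ( string ):
--     k = 0
--     l = list(string)
--     s=""
--     for i in range( len(l) ) :
--         if l[i]=='"':
--             k+=1
--             s+=l[i]
--         elif l[i]==" " and k%2==0:
--             continue
--         elif l[i]=='$' and k%2==0:
--             break
--         else:
--             s+=l[i]
--     return s
-- ===== SOURCE B (Python) =====
-- def delSpace(string):
--     out = []
--     for i, tok in enumerate(string.split('"')):
--         if i % 2 == 1:
--             out.append(tok)
--         else:
--             pre, dollar, _ = tok.partition('$')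
--             out.append(pre.replace(' ', ''))
--             if dollar:
--                 break
--     return '"'.join(out)
-- ===== Notes on version B (the rewrite author's own statement) =====
-- stated objective: faster
-- what changed: Replaced the per-character quote-parity state machine with a per-segment pass: split the string on the quote character, strip spaces and cut at the first dollar sign only in even (outside-quote) segments, and rejoin the kept segments with quotes; segment work uses bulk str.split/replace/partition/join instead of per-character Python bytecode.
import Mathlib
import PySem

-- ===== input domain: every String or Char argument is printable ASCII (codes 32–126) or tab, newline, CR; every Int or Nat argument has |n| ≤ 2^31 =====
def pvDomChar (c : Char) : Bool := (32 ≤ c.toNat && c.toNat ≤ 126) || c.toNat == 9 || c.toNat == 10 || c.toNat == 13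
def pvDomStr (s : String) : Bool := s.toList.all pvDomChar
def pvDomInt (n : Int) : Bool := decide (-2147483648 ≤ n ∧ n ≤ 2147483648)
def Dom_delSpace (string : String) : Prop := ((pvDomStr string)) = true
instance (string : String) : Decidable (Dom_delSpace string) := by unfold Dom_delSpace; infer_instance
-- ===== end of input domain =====

-- B replaces A's per-character quote-parity state machine by a per-segment pass:
-- split on '"', strip spaces / cut at '$' only in even (outside-quote) segments, rejoin with '"'.
-- Objective: same O(n) but measurably faster (bulk split/replace/join instead of a per-character loop).

-- ===== PORT A =====
-- the for-loop over the characters, state (k, s); 'break' returns s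
def delSpaceAux (l : List Char) (k : Nat) (s : List Char) : List Char :=
  match l with
  | [] => s
  | c :: rest =>
    if c = '"' then delSpaceAux rest (k + 1) (s ++ [c])
    else if c = ' ' ∧ k % 2 = 0 then delSpaceAux rest k s
    else if c = '$' ∧ k % 2 = 0 then s
    else delSpaceAux rest k (s ++ [c])

def delSpace (string : String) : String := String.ofList (delSpaceAux string.toList 0 [])

-- ===== PORT B =====
-- loop of Source B over enumerate(string.split('"')) with the accumulator `out`;
-- tok.partition('$')[0] = takeWhile (· ≠ '$'); pre.replace(' ','') = filter (· ≠ ' ');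
-- 'if dollar:' (separator found) = '$' ∈ tok; '"'.join(out) = intercalate ['"'] out
def delSpaceAltAux (toks : List (List Char)) (i : Nat) (out : List (List Char)) : List Char :=
  match toks with
  | [] => List.intercalate ['"'] out
  | tok :: rest =>
    if i % 2 = 1 then delSpaceAltAux rest (i + 1) (out ++ [tok])
    else
      let pre := tok.takeWhile (· ≠ '$')
      let out' := out ++ [pre.filter (· ≠ ' ')]
      if '$' ∈ tok then List.intercalate ['"'] out'
      else delSpaceAltAux rest (i + 1) out'

def delSpace_alt (string : String) : String :=
  String.ofList (delSpaceAltAux (string.toList.splitOn '"') 0 [])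

-- ===== PRECONDITION & SPEC =====
def Spec_delSpace (string : String) (out : String) : Prop := out = delSpace_alt string
instance (string : String) (out : String) : Decidable (Spec_delSpace string out) := by unfold Spec_delSpace; infer_instance

-- ===== CLAIM (what is proved, stated in full; the proofs are below) =====
def Claim_equal_delSpace : Prop := ∀ (string : String), Dom_delSpace string → Spec_delSpace string (delSpace string)

-- ===== LEMMAS AND PROOFS =====

-- result tokens of B, accumulator-free
def resTokens (toks : List (List Char)) (i : Nat) : List (List Char) :=
  match toks with
  | [] => []
  | tok :: rest =>
    if i % 2 = 1 then tok :: resTokens rest (i + 1)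
    else if '$' ∈ tok then [(tok.takeWhile (· ≠ '$')).filter (· ≠ ' ')]
    else tok.filter (· ≠ ' ') :: resTokens rest (i + 1)

theorem resTokens_ne_nil (toks : List (List Char)) (i : Nat) (h : toks ≠ []) :
    resTokens toks i ≠ [] := by
  cases toks with
  | nil => exact absurd rfl h
  | cons tok rest =>
    unfold resTokens
    split_ifs <;> simp

theorem takeWhile_eq_self_of_not_mem (t : List Char) (h : '$' ∉ t) :
    t.takeWhile (· ≠ '$') = t :=
  List.takeWhile_eq_self_iff.mpr (by
    intro x hx
    simp only [decide_eq_true_eq]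
    exact fun hx' => h (hx' ▸ hx))

theorem ic_nil : List.intercalate ['"'] ([] : List (List Char)) = [] := by
  simp [List.intercalate]

theorem ic_singleton (a : List Char) : List.intercalate ['"'] [a] = a := by
  simp [List.intercalate]

theorem intercalate_q_cons (a : List Char) (l : List (List Char)) (h : l ≠ []) :
    List.intercalate ['"'] (a :: l) = a ++ '"' :: List.intercalate ['"'] l := by
  cases l with
  | nil => exact absurd rfl h
  | cons b t => simp [List.intercalate]

theorem alt_acc (toks : List (List Char)) (i : Nat) (out : List (List Char)) :
    delSpaceAltAux toks i out = List.intercalate ['"'] (out ++ resTokens toks i) := by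
  induction toks generalizing i out with
  | nil => simp [delSpaceAltAux, resTokens]
  | cons tok rest ih =>
    unfold delSpaceAltAux resTokens
    split_ifs with h1 h2
    · rw [ih]; simp
    · simp
    · rw [takeWhile_eq_self_of_not_mem tok h2, ih]; simp

-- single-step unfoldings of A's loop
theorem step_quote (Y : List Char) (i : Nat) (Z : List Char) :
    delSpaceAux ('"' :: Y) i Z = delSpaceAux Y (i + 1) (Z ++ ['"']) := by
  simp [delSpaceAux]

theorem step_space (Y : List Char) (i : Nat) (Z : List Char) (hp : i % 2 = 0) :
    delSpaceAux (' ' :: Y) i Z = delSpaceAux Y i Z := by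
  simp [delSpaceAux, hp]

theorem step_dollar (Y : List Char) (i : Nat) (Z : List Char) (hp : i % 2 = 0) :
    delSpaceAux ('$' :: Y) i Z = Z := by
  simp [delSpaceAux, hp]

theorem step_other (c : Char) (Y : List Char) (i : Nat) (Z : List Char)
    (h1 : ¬c = '"') (h2 : ¬(c = ' ' ∧ i % 2 = 0)) (h3 : ¬(c = '$' ∧ i % 2 = 0)) :
    delSpaceAux (c :: Y) i Z = delSpaceAux Y i (Z ++ [c]) := by
  simp only [delSpaceAux]
  rw [if_neg h1, if_neg h2, if_neg h3]

-- A's loop on an even-parity (outside-quote) quote-free segment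
theorem even_tok (i : Nat) (hp : i % 2 = 0) :
    ∀ (tok X acc : List Char), '"' ∉ tok →
      delSpaceAux (tok ++ X) i acc =
        if '$' ∈ tok then acc ++ (tok.takeWhile (· ≠ '$')).filter (· ≠ ' ')
        else delSpaceAux X i (acc ++ tok.filter (· ≠ ' ')) := by
  intro tok
  induction tok with
  | nil => intro X acc _; simp
  | cons c rest ih =>
    intro X acc hq
    simp only [List.mem_cons, not_or] at hq
    have hcq : ¬(c = '"') := fun h => hq.1 h.symm
    by_cases hc : c = '$'
    · subst hc
      rw [List.cons_append, step_dollar _ i acc hp]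
      simp
    · have hc' : ¬'$' = c := fun h => hc h.symm
      by_cases hs : c = ' '
      · subst hs
        rw [List.cons_append, step_space _ i acc hp, ih X acc hq.2]
        by_cases hd : '$' ∈ rest
        · rw [if_pos hd, if_pos (by simp [hd])]
          simp [hc]
        · rw [if_neg hd, if_neg (by simp [hd, hc'])]
          simp
      · rw [List.cons_append,
          step_other c _ i acc hcq (by simp [hs]) (by simp [hc]),
          ih X (acc ++ [c]) hq.2]
        by_cases hd : '$' ∈ rest
        · rw [if_pos hd, if_pos (by simp [hd])]
          simp [hc, hs]
        · rw [if_neg hd, if_neg (by simp [hd, hc'])]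
          congr 1
          simp [hs]

-- A's loop on an odd-parity (inside-quote) quote-free segment copies it verbatim
theorem odd_tok (i : Nat) (hp : i % 2 = 1) :
    ∀ (tok X acc : List Char), '"' ∉ tok →
      delSpaceAux (tok ++ X) i acc = delSpaceAux X i (acc ++ tok) := by
  intro tok
  induction tok with
  | nil => intro X acc _; simp
  | cons c rest ih =>
    intro X acc hq
    simp only [List.mem_cons, not_or] at hq
    have hcq : ¬(c = '"') := fun h => hq.1 h.symm
    rw [List.cons_append,
      step_other c _ i acc hcq (by simp [hp]) (by simp [hp]),
      ih X (acc ++ [c]) hq.2]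
    simp

theorem main_lemma :
    ∀ (toks : List (List Char)), (∀ t ∈ toks, '"' ∉ t) → ∀ (i : Nat) (acc : List Char),
      delSpaceAux (List.intercalate ['"'] toks) i acc =
        acc ++ List.intercalate ['"'] (resTokens toks i) := by
  intro toks
  induction toks with
  | nil => intro _ i acc; simp [resTokens, ic_nil, delSpaceAux]
  | cons tok rest ih =>
    intro hq i acc
    have hqt : '"' ∉ tok := hq tok (by simp)
    have hqr : ∀ t ∈ rest, '"' ∉ t := fun t ht => hq t (by simp [ht])
    have ihr := ih hqr
    rcases Nat.mod_two_eq_zero_or_one i with hp | hp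
    · have hp1 : ¬(i % 2 = 1) := by omega
      cases rest with
      | nil =>
        rw [ic_singleton]
        have h := even_tok i hp tok [] acc hqt
        rw [List.append_nil] at h
        rw [h]
        by_cases hd : '$' ∈ tok
        · simp [hd, resTokens, hp1, ic_singleton]
        · simp [hd, resTokens, hp1, ic_singleton, delSpaceAux]
      | cons b t =>
        rw [intercalate_q_cons tok (b :: t) (by simp)]
        rw [even_tok i hp tok ('"' :: List.intercalate ['"'] (b :: t)) acc hqt]
        by_cases hd : '$' ∈ tok
        · simp [hd, resTokens, hp1, ic_singleton]
        · rw [if_neg hd, step_quote _ i _,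
            ihr (i + 1) (acc ++ tok.filter (· ≠ ' ') ++ ['"']),
            show resTokens (tok :: b :: t) i
                = tok.filter (· ≠ ' ') :: resTokens (b :: t) (i + 1) by
              simp [resTokens, hp1, hd],
            intercalate_q_cons _ _ (resTokens_ne_nil (b :: t) (i + 1) (by simp))]
          simp
    · cases rest with
      | nil =>
        rw [ic_singleton]
        have h := odd_tok i hp tok [] acc hqt
        rw [List.append_nil] at h
        rw [h]
        simp [resTokens, hp, ic_singleton, delSpaceAux]
      | cons b t =>
        rw [intercalate_q_cons tok (b :: t) (by simp),
          odd_tok i hp tok ('"' :: List.intercalate ['"'] (b :: t)) acc hqt,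
          step_quote _ i _,
          ihr (i + 1) (acc ++ tok ++ ['"']),
          show resTokens (tok :: b :: t) i = tok :: resTokens (b :: t) (i + 1) by
            simp [resTokens, hp],
          intercalate_q_cons _ _ (resTokens_ne_nil (b :: t) (i + 1) (by simp))]
        simp

theorem splitOn_quote_free (cs : List Char) : ∀ t ∈ cs.splitOn '"', '"' ∉ t := by
  have key : ∀ (l : List Char), ∀ t ∈ l.splitOnP (· == '"'), '"' ∉ t := by
    intro l
    induction l with
    | nil => simp [List.splitOnP_nil]
    | cons c rest ih =>
      rw [List.splitOnP_cons]
      by_cases hc : c = '"'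
      · rw [if_pos (by simp [hc])]
        intro t ht
        rcases List.mem_cons.1 ht with h | h
        · simp [h]
        · exact ih t h
      · rw [if_neg (by simp [hc])]
        cases hsp : rest.splitOnP (· == '"') with
        | nil => simp
        | cons h0 tl =>
          intro t ht
          simp only [List.modifyHead_cons, List.mem_cons] at ht
          rcases ht with h | h
          · subst h
            simp only [List.mem_cons, not_or]
            exact ⟨Ne.symm hc, ih h0 (by rw [hsp]; simp)⟩
          · exact ih t (by rw [hsp]; simp [h])
  exact key cs

-- ===== VERDICT (by name: the statement is the Claim_ definition above) =====
theorem delSpace_spec : Claim_equal_delSpace := by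
  intro string _
  unfold Spec_delSpace delSpace delSpace_alt
  rw [alt_acc, List.nil_append]
  conv_lhs => rw [show string.toList = ['"'].intercalate (string.toList.splitOn '"') from
    (List.intercalate_splitOn (xs := string.toList) '"').symm]
  rw [main_lemma _ (splitOn_quote_free string.toList) 0 []]
  rw [List.nil_append]
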